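-- pv_equiv track=rewrite | github.com/g2hsec/bundleInspector | src/bundleInspector/correlator/graph.py | _import_matches
-- ===== SOURCE A (Python) =====
-- def _import_matches(import_aliases: set[str], target_aliases: set[str]) -> bool:
--     """Check whether an import source likely refers to a target file."""
--     for import_alias in import_aliases:
--         for target_alias in target_aliases:
--             if import_alias == target_alias:
--                 return True
--             if target_alias.endswith(import_alias) or import_alias.endswith(target_alias):
--                 return True
--     return False
-- ===== SOURCE B (Python) =====
-- def _import_matches(import_aliases: set[str], target_aliases: set[str]) -> bool:
--     """Check whether an import source likely refers to a target file."""
--     target_suffixes = {t[i:] for t in target_aliases for i in range(len(t) + 1)}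
--     if any(ia in target_suffixes for ia in import_aliases):
--         return True
--     import_suffixes = {ia[i:] for ia in import_aliases for i in range(len(ia) + 1)}
--     return any(t in import_suffixes for t in target_aliases)
-- ===== Notes on version B (the rewrite author's own statement) =====
-- stated objective: alternative
-- what changed: Replaces the nested pairwise alias scan with a hash set of all suffixes of each side, so each alias is tested by set membership instead of being compared against every alias of the other side; it trades A's early exit (cheap when a match comes first) for pair-free O((n+m)*L^2) preprocessing.
import Mathlib
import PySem

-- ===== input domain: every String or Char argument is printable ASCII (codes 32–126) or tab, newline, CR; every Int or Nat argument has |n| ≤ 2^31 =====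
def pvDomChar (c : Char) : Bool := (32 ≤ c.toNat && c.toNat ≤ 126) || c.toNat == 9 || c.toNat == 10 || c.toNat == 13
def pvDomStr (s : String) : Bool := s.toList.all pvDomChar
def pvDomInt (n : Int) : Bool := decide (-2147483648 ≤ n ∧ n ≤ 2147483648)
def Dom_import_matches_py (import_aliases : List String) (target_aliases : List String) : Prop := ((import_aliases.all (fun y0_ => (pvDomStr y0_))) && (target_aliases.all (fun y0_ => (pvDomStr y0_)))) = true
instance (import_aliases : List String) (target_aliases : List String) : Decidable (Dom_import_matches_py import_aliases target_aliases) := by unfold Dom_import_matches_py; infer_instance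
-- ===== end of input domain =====

-- B replaces the nested pairwise scan by membership tests in a set of all suffixes of the other side.

-- ===== PORT A =====
-- inner 'for target_alias in target_aliases' loop with its early returns
def pvAInner (import_alias : String) : List String → Bool
  | [] => false
  | target_alias :: rest =>
    if import_alias == target_alias then true
    else if PySem.Str.endswith target_alias import_alias || PySem.Str.endswith import_alias target_alias then true
    else pvAInner import_alias rest

-- outer 'for import_alias in import_aliases' loop
def pvAOuter (target_aliases : List String) : List String → Bool
  | [] => false
  | import_alias :: rest =>
    if pvAInner import_alias target_aliases then true
    else pvAOuter target_aliases rest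

def import_matches_py (import_aliases : List String) (target_aliases : List String) : Bool :=
  pvAOuter target_aliases import_aliases

-- ===== PORT B =====
-- {x[i:] for x in xs for i in range(len(x) + 1)}
def pvSuffixSet (xs : List String) : PySem.Set String :=
  xs.foldl (fun acc x =>
    (PySem.List.pyRange 0 (PySem.Str.len x + 1) 1).foldl
      (fun acc2 i => PySem.Set.add acc2 (PySem.Str.slice x (some i) none)) acc)
    PySem.Set.empty

def import_matches_py_alt (import_aliases : List String) (target_aliases : List String) : Bool :=
  if import_aliases.any (fun ia => PySem.Set.contains (pvSuffixSet target_aliases) ia) then true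
  else target_aliases.any (fun t => PySem.Set.contains (pvSuffixSet import_aliases) t)

-- ===== PRECONDITION & SPEC =====
def Spec_import_matches_py (import_aliases : List String) (target_aliases : List String) (out : Bool) : Prop := out = import_matches_py_alt import_aliases target_aliases
instance (import_aliases : List String) (target_aliases : List String) (out : Bool) : Decidable (Spec_import_matches_py import_aliases target_aliases out) := by unfold Spec_import_matches_py; infer_instance

-- ===== CLAIM (what is proved, stated in full; the proofs are below) =====
def Claim_equal_import_matches_py : Prop := ∀ (import_aliases : List String) (target_aliases : List String), Dom_import_matches_py import_aliases target_aliases → Spec_import_matches_py import_aliases target_aliases (import_matches_py import_aliases target_aliases)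

-- ===== LEMMAS AND PROOFS =====

-- inner loop of A hits iff some target alias is suffix-related to the import alias
theorem pvAInner_iff (i : String) (ts : List String) :
    pvAInner i ts = true ↔ ∃ t ∈ ts, (i.toList <:+ t.toList ∨ t.toList <:+ i.toList) := by
  induction ts with
  | nil => simp [pvAInner]
  | cons t rest ih =>
    simp only [pvAInner, List.mem_cons]
    split_ifs with h1 h2
    · simp only [beq_iff_eq] at h1
      subst h1
      exact ⟨fun _ => ⟨i, Or.inl rfl, Or.inl List.suffix_rfl⟩, fun _ => rfl⟩
    · rw [Bool.or_eq_true, PySem.Str.endswith_eq, PySem.Str.endswith_eq,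
        PySem.Chars.endswith_iff, PySem.Chars.endswith_iff] at h2
      exact ⟨fun _ => ⟨t, Or.inl rfl, h2⟩, fun _ => rfl⟩
    · rw [ih]
      constructor
      · rintro ⟨x, hx, hs⟩; exact ⟨x, Or.inr hx, hs⟩
      · rintro ⟨x, hx, hs⟩
        rcases hx with rfl | hx
        · rw [Bool.or_eq_true, PySem.Str.endswith_eq, PySem.Str.endswith_eq,
            PySem.Chars.endswith_iff, PySem.Chars.endswith_iff] at h2
          exact absurd hs h2
        · exact ⟨x, hx, hs⟩

theorem pvAOuter_iff (ts is : List String) :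
    pvAOuter ts is = true ↔ ∃ i ∈ is, ∃ t ∈ ts, (i.toList <:+ t.toList ∨ t.toList <:+ i.toList) := by
  induction is with
  | nil => simp [pvAOuter]
  | cons i rest ih =>
    simp only [pvAOuter, List.mem_cons]
    split_ifs with h1
    · rw [pvAInner_iff] at h1
      exact ⟨fun _ => ⟨i, Or.inl rfl, h1⟩, fun _ => rfl⟩
    · rw [ih]
      constructor
      · rintro ⟨x, hx, hs⟩; exact ⟨x, Or.inr hx, hs⟩
      · rintro ⟨x, hx, hs⟩
        rcases hx with rfl | hx
        · rw [pvAInner_iff] at h1; exact absurd hs h1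
        · exact ⟨x, hx, hs⟩

-- membership in a foldl of Set.add
theorem pvMem_foldl_add {β : Type} (f : β → String) (l : List β) (s : PySem.Set String) (y : String) :
    y ∈ l.foldl (fun a b => PySem.Set.add a (f b)) s ↔ y ∈ s ∨ ∃ b ∈ l, y = f b := by
  induction l generalizing s with
  | nil => simp
  | cons b rest ih =>
    rw [List.foldl_cons, ih]
    simp only [PySem.Set.mem_add, List.mem_cons]
    constructor
    · rintro ((h | h) | ⟨c, hc, rfl⟩)
      · exact Or.inl h
      · exact Or.inr ⟨b, Or.inl rfl, h⟩
      · exact Or.inr ⟨c, Or.inr hc, rfl⟩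
    · rintro (h | ⟨c, (rfl | hc), rfl⟩)
      · exact Or.inl (Or.inl h)
      · exact Or.inl (Or.inr rfl)
      · exact Or.inr ⟨c, hc, rfl⟩

-- 'y is one of the slices x[i:], i in range(len(x)+1)' ↔ 'y.toList is a suffix of x.toList'
theorem pvSliceSuffix (x y : String) :
    (∃ i ∈ PySem.List.pyRange 0 (PySem.Str.len x + 1) 1, y = PySem.Str.slice x (some i) none) ↔
      y.toList <:+ x.toList := by
  constructor
  · rintro ⟨i, hi, rfl⟩
    rw [PySem.List.mem_pyRange_one] at hi
    rw [PySem.Str.toList_slice, PySem.Chars.slice_eq_listSlice,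
      PySem.List.slice_from _ hi.1]
    exact List.drop_suffix _ _
  · rintro ⟨u, hu⟩
    refine ⟨(u.length : Int), ?_, ?_⟩
    · rw [PySem.List.mem_pyRange_one, PySem.Str.len_eq]
      have : u.length + y.toList.length = x.toList.length := by
        rw [← hu]; simp
      constructor
      · exact Int.natCast_nonneg _
      · omega
    · apply String.toList_inj.mp
      rw [PySem.Str.toList_slice, PySem.Chars.slice_eq_listSlice,
        PySem.List.slice_from _ (Int.natCast_nonneg _)]
      rw [Int.toNat_natCast, ← hu]
      simp

-- characterisation of the suffix set built by B
theorem pvMem_suffixSet (xs : List String) (y : String) :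
    y ∈ pvSuffixSet xs ↔ ∃ x ∈ xs, y.toList <:+ x.toList := by
  unfold pvSuffixSet
  have key : ∀ (l : List String) (s : PySem.Set String),
      y ∈ l.foldl (fun acc x =>
        (PySem.List.pyRange 0 (PySem.Str.len x + 1) 1).foldl
          (fun acc2 i => PySem.Set.add acc2 (PySem.Str.slice x (some i) none)) acc) s ↔
      y ∈ s ∨ ∃ x ∈ l, y.toList <:+ x.toList := by
    intro l
    induction l with
    | nil => simp
    | cons x rest ih =>
      intro s
      rw [List.foldl_cons, ih, pvMem_foldl_add]
      simp only [List.mem_cons]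
      constructor
      · rintro ((h | h) | ⟨c, hc, hs⟩)
        · exact Or.inl h
        · exact Or.inr ⟨x, Or.inl rfl, (pvSliceSuffix x y).mp h⟩
        · exact Or.inr ⟨c, Or.inr hc, hs⟩
      · rintro (h | ⟨c, (rfl | hc), hs⟩)
        · exact Or.inl (Or.inl h)
        · exact Or.inl (Or.inr ((pvSliceSuffix c y).mpr hs))
        · exact Or.inr ⟨c, hc, hs⟩
  rw [key]
  simp [PySem.Set.empty]

theorem pvAlt_iff (is ts : List String) :
    import_matches_py_alt is ts = true ↔
      ∃ i ∈ is, ∃ t ∈ ts, (i.toList <:+ t.toList ∨ t.toList <:+ i.toList) := by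
  unfold import_matches_py_alt
  split_ifs with h
  · simp only [List.any_eq_true] at h
    obtain ⟨i, hi, hc⟩ := h
    rw [PySem.Set.contains_iff, pvMem_suffixSet] at hc
    obtain ⟨t, ht, hs⟩ := hc
    exact ⟨fun _ => ⟨i, hi, t, ht, Or.inl hs⟩, fun _ => rfl⟩
  · simp only [List.any_eq_true] at h ⊢
    constructor
    · rintro ⟨t, ht, hc⟩
      rw [PySem.Set.contains_iff, pvMem_suffixSet] at hc
      obtain ⟨i, hi, hs⟩ := hc
      exact ⟨i, hi, t, ht, Or.inr hs⟩
    · rintro ⟨i, hi, t, ht, hs | hs⟩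
      · exact absurd ⟨i, hi, by rw [PySem.Set.contains_iff, pvMem_suffixSet]; exact ⟨t, ht, hs⟩⟩ h
      · exact ⟨t, ht, by rw [PySem.Set.contains_iff, pvMem_suffixSet]; exact ⟨i, hi, hs⟩⟩

-- ===== VERDICT (by name: the statement is the Claim_ definition above) =====
theorem import_matches_py_spec : Claim_equal_import_matches_py := by
  intro is ts _
  unfold Spec_import_matches_py import_matches_py
  rcases hb : import_matches_py_alt is ts with _ | _
  · rcases ha : pvAOuter ts is with _ | _
    · rfl
    · rw [pvAOuter_iff] at ha
      rw [← pvAlt_iff is ts] at ha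
      rw [ha] at hb; exact hb
  · rw [pvAlt_iff] at hb
    rw [← pvAOuter_iff ts is] at hb
    exact hb
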